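-- pv_equiv track=rewrite | github.com/shft1/Algorithms-Structures-Tasks | Practicum/8_sprint/L - Подсчёт префикс-функции/solution.py | solution
-- ===== SOURCE A (Python) =====
-- def solution(L):
--     lenght_L = len(L)
--     p = [None] * lenght_L
--     p[0] = 0
--     for i in range(1, lenght_L):
--         k = p[i - 1]
--         while k > 0 and L[k] != L[i]:
--             k = p[k - 1]
--         if L[k] == L[i]:
--             k += 1
--         p[i] = k
--     return " ".join(map(str, p))
-- ===== SOURCE B (Python) =====
-- def solution(L):
--     n = len(L)
--     p = [None] * n
--     p[0] = 0
--     for i in range(1, n):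
--         k = 0
--         for c in range(i, 0, -1):
--             if L[0:c] == L[i - c + 1:i + 1]:
--                 k = c
--                 break
--         p[i] = k
--     return " ".join(map(str, p))
-- ===== Notes on version B (the rewrite author's own statement) =====
-- stated objective: simpler
-- what changed: Replaced the KMP failure-link loop (k = p[k-1] chasing) by the direct definition of the prefix function: for each i take the largest c with L[0:c] == L[i-c+1:i+1], found by scanning c downward.
import Mathlib
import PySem

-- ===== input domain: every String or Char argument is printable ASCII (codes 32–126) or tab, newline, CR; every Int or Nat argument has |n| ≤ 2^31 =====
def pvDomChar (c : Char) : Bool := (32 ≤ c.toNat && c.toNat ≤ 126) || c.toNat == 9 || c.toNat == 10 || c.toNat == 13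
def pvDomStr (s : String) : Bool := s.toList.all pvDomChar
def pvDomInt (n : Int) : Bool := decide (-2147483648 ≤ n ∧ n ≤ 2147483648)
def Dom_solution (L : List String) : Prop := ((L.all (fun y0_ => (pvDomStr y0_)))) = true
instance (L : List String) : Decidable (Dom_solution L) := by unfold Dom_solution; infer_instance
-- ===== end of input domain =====

-- B replaces A's KMP failure-link chase by the direct definition of the prefix function
-- (largest c with L[0:c] == L[i-c+1:i+1], scanned downward); objective: simpler, not faster.

-- ===== PORT A =====
-- A's while loop: k = p[i-1]; while k > 0 and L[k] != L[i]: k = p[k-1].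
-- The fuel argument only makes the recursion total; it is never exhausted on a real run
-- (each step strictly decreases k because p[j] ≤ j throughout A's computation).
def pvChase (L : List String) (p : List Nat) (i : Nat) : Nat → Nat → Nat
  | 0, k => k
  | fuel+1, k =>
    if 0 < k ∧ L.getD k "" ≠ L.getD i "" then pvChase L p i fuel (p.getD (k-1) 0) else k

def pvStepA (L : List String) (p : List Nat) (i : Nat) : Nat :=
  let k := pvChase L p i L.length (p.getD (i-1) 0)
  if L.getD k "" = L.getD i "" then k + 1 else k

def solution (L : List String) : String :=
  let n := L.length
  let p := (List.range' 1 (n-1)).foldl (fun p i => p ++ [pvStepA L p i]) [0]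
  PySem.Str.join " " (p.map (fun k => PySem.Int.toStr (Int.ofNat k)))

-- ===== PORT B =====
-- the slice comparison L[0:c] == L[i-c+1:i+1]
def pvBord (L : List String) (i : Nat) (c : Int) : Bool :=
  PySem.List.slice L (some 0) (some c) == PySem.List.slice L (some ((i : Int) - c + 1)) (some ((i : Int) + 1))

-- inner loop: for c in range(i, 0, -1): if <slices equal>: k = c; break   (else k stays 0)
def pvLB (L : List String) (i : Nat) : Int :=
  ((PySem.List.pyRange (i : Int) 0 (-1)).find? (fun c => pvBord L i c)).getD 0

def solution_alt (L : List String) : String :=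
  let n := L.length
  let p := (0 : Int) :: (List.range' 1 (n-1)).map (fun i => pvLB L i)
  PySem.Str.join " " (p.map (fun k => PySem.Int.toStr k))

-- ===== PRECONDITION & SPEC =====
-- Pre_ excludes only the empty list, on which the Python A raises IndexError at p[0] = 0.
def Pre_solution (L : List String) : Prop := L ≠ []
instance (L : List String) : Decidable (Pre_solution L) := by unfold Pre_solution; infer_instance
def pvWitness_solution : List String := ["a", "b", "a"]
def Spec_solution (L : List String) (out : String) : Prop := out = solution_alt L
instance (L : List String) (out : String) : Decidable (Spec_solution L out) := by unfold Spec_solution; infer_instance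

-- ===== CLAIM (what is proved, stated in full; the proofs are below) =====
def Claim_equal_solution : Prop := ∀ (L : List String), Dom_solution L → Pre_solution L → Spec_solution L (solution L)

-- ===== LEMMAS AND PROOFS =====

-- Pointwise border predicate: L[0:c] equals the length-c segment of L ending at index i.
def Brd (L : List String) (i c : Nat) : Prop := ∀ j, j < c → L.getD j "" = L.getD (i + 1 - c + j) ""

-- Nat-level version of B's inner loop, used as the common specification of both ports.
def lbn (L : List String) (i : Nat) : Nat :=
  (((List.range' 1 i).reverse).find? (fun c : Nat => pvBord L i (c : Int))).getD 0

theorem brd_zero (L : List String) (i : Nat) : Brd L i 0 := by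
  intro j hj; omega

-- boolean slice test ↔ pointwise predicate (for c ≤ i < L.length)
theorem pvBord_iff (L : List String) (i c : Nat) (hc : c ≤ i) (hi : i < L.length) :
    pvBord L i (c : Int) = true ↔ Brd L i c := by
  have h1 : (i : Int) - c + 1 = ((i + 1 - c : Nat) : Int) := by omega
  have h2 : ((i : Int) + 1) = ((i + 1 : Nat) : Int) := by omega
  rw [pvBord, h1, h2, PySem.List.slice_zero_start, PySem.List.slice_to_natCast,
      PySem.List.slice_natCast, beq_iff_eq]
  have hsub : (i + 1) - (i + 1 - c) = c := by omega
  rw [hsub]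
  have hlen1 : (L.take c).length = c := by simp; omega
  have hlen2 : ((L.drop (i + 1 - c)).take c).length = c := by simp; omega
  constructor
  · intro heq j hj
    have : (L.take c)[j]'(by omega) = ((L.drop (i + 1 - c)).take c)[j]'(by omega) :=
      List.getElem_of_eq heq _
    simp only [List.getElem_take, List.getElem_drop] at this
    rw [List.getD_eq_getElem L "" (by omega), List.getD_eq_getElem L "" (by omega)]
    exact this
  · intro hb
    apply List.ext_getElem (by omega)
    intro j hj1 hj2
    simp only [List.getElem_take, List.getElem_drop]
    have := hb j (by omega)
    rwa [List.getD_eq_getElem L "" (by omega), List.getD_eq_getElem L "" (by omega)] at this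

-- extension: a (c+1)-border ending at i is a c-border ending at i-1 plus a matching letter
theorem brd_succ_iff (L : List String) (i c : Nat) (h : c + 1 ≤ i) :
    Brd L i (c + 1) ↔ Brd L (i - 1) c ∧ L.getD c "" = L.getD i "" := by
  constructor
  · intro hb
    refine ⟨fun j hj => ?_, ?_⟩
    · have := hb j (by omega)
      have e : i + 1 - (c + 1) + j = i - 1 + 1 - c + j := by omega
      rwa [e] at this
    · have := hb c (by omega)
      have e : i + 1 - (c + 1) + c = i := by omega
      rwa [e] at this
  · rintro ⟨hb, hl⟩ j hj
    rcases Nat.lt_or_ge j c with hjc | hjc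
    · have := hb j hjc
      have e : i - 1 + 1 - c + j = i + 1 - (c + 1) + j := by omega
      rwa [e] at this
    · have e1 : j = c := by omega
      have e2 : i + 1 - (c + 1) + j = i := by omega
      rw [e2, e1]; exact hl

-- nesting: a shorter border is a border of the longer border
theorem brd_nest (L : List String) (i a b : Nat) (hab : a < b) (hbi : b ≤ i)
    (ha : Brd L i a) (hb : Brd L i b) : Brd L (b - 1) a := by
  intro j hj
  have h1 := ha j hj
  have h2 := hb (b - a + j) (by omega)
  have e1 : i + 1 - b + (b - a + j) = i + 1 - a + j := by omega
  have e2 : b - 1 + 1 - a + j = b - a + j := by omega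
  rw [e1] at h2
  rw [e2, h2]; exact h1

-- transitivity: a border of a border is a border
theorem brd_trans (L : List String) (i a b : Nat) (hb1 : 1 ≤ b) (hbi : b ≤ i)
    (hab : a ≤ b - 1) (ha : Brd L (b - 1) a) (hb : Brd L i b) : Brd L i a := by
  intro j hj
  have h1 := ha j hj
  have h2 := hb (b - a + j) (by omega)
  have e1 : b - 1 + 1 - a + j = b - a + j := by omega
  have e2 : i + 1 - b + (b - a + j) = i + 1 - a + j := by omega
  rw [e1] at h1
  rw [e2] at h2
  rw [h1, h2]

-- on a strictly descending list, the first hit of find? is the largest hit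
theorem find?_desc_ge {p : Nat → Bool} :
    ∀ (l : List Nat), l.Pairwise (fun a b => b ≤ a) → ∀ c ∈ l, p c = true →
      ∃ x, l.find? p = some x ∧ c ≤ x := by
  intro l
  induction l with
  | nil => intro _ c hc; simp at hc
  | cons a t ih =>
    intro hp c hc hpc
    rcases List.pairwise_cons.mp hp with ⟨hle, ht⟩
    by_cases hpa : p a = true
    · exact ⟨a, by simp [List.find?_cons_of_pos hpa], by
        rcases List.mem_cons.mp hc with rfl | hct
        · exact le_refl _
        · exact hle c hct⟩
    · have hct : c ∈ t := by
        rcases List.mem_cons.mp hc with rfl | hct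
        · exact absurd hpc hpa
        · exact hct
      rcases ih ht c hct hpc with ⟨x, hx, hcx⟩
      exact ⟨x, by simp [List.find?_cons_of_neg hpa, hx], hcx⟩

theorem mem_rev_range' (i c : Nat) : c ∈ (List.range' 1 i).reverse ↔ 1 ≤ c ∧ c ≤ i := by
  rw [List.mem_reverse, List.mem_range'_1]
  omega

theorem pairwise_rev_range' (i : Nat) : ((List.range' 1 i).reverse).Pairwise (fun a b => b ≤ a) := by
  rw [List.pairwise_reverse]
  exact (List.pairwise_lt_range').imp (fun h => le_of_lt h)

theorem lbn_le (L : List String) (i : Nat) : lbn L i ≤ i := by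
  unfold lbn
  cases h : ((List.range' 1 i).reverse).find? (fun c : Nat => pvBord L i (c : Int)) with
  | none => simp
  | some c =>
    have := List.mem_of_find?_eq_some h
    rw [mem_rev_range'] at this
    simpa using this.2

theorem lbn_brd (L : List String) (i : Nat) (hi : i < L.length) : Brd L i (lbn L i) := by
  unfold lbn
  cases h : ((List.range' 1 i).reverse).find? (fun c : Nat => pvBord L i (c : Int)) with
  | none => exact brd_zero L i
  | some c =>
    have hm := List.mem_of_find?_eq_some h
    rw [mem_rev_range'] at hm
    have hpc := List.find?_some h
    simp only [Option.getD_some]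
    exact (pvBord_iff L i c hm.2 hi).mp hpc

theorem lbn_max (L : List String) (i m : Nat) (hi : i < L.length) (hm : m ≤ i)
    (hb : Brd L i m) : m ≤ lbn L i := by
  rcases Nat.eq_zero_or_pos m with rfl | hm1
  · omega
  · have hmem : m ∈ (List.range' 1 i).reverse := (mem_rev_range' i m).mpr ⟨hm1, hm⟩
    have hpm : (fun c : Nat => pvBord L i (c : Int)) m = true := by
      simpa using (pvBord_iff L i m hm hi).mpr hb
    rcases find?_desc_ge (p := fun c : Nat => pvBord L i (c : Int)) _ (pairwise_rev_range' i) m hmem hpm with ⟨x, hx, hmx⟩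
    unfold lbn
    rw [hx]
    simpa using hmx

-- range(i, 0, -1) is the reversed [1, …, i], elementwise cast to Int
theorem pyRange_down_eq (i : Nat) :
    PySem.List.pyRange (i : Int) 0 (-1) = ((List.range' 1 i).reverse).map (fun c : Nat => (c : Int)) := by
  induction i with
  | zero => simp [PySem.List.pyRange_neg_one_eq_nil]
  | succ n ih =>
    rw [PySem.List.pyRange_neg_one_cons (by exact_mod_cast Nat.succ_pos n)]
    have e : ((n + 1 : Nat) : Int) - 1 = (n : Int) := by push_cast; ring
    rw [e, ih, List.range'_concat]
    simp
    omega

theorem pvLB_eq_lbn (L : List String) (i : Nat) : pvLB L i = (lbn L i : Int) := by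
  unfold pvLB lbn
  rw [pyRange_down_eq, List.find?_map]
  have hc : ((fun c : Int => pvBord L i c) ∘ fun c : Nat => (c : Int)) = (fun c : Nat => pvBord L i (c : Int)) := rfl
  rw [hc]
  cases h : ((List.range' 1 i).reverse).find? (fun c : Nat => pvBord L i (c : Int)) with
  | none => rfl
  | some c => rfl

-- A's while loop, given correct earlier p-values, keeps k a border of position i that
-- dominates every matching border, and exits at k = 0 or a matching letter
theorem chase_correct (L : List String) (p : List Nat) (i : Nat) (hi : i + 1 < L.length)
    (hp : ∀ j, j ≤ i → p.getD j 0 = lbn L j) :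
    ∀ fuel k, k ≤ fuel → k ≤ i → Brd L i k →
      (∀ m, m ≤ i → Brd L i m → L.getD m "" = L.getD (i + 1) "" → m ≤ k) →
      (pvChase L p (i + 1) fuel k ≤ i ∧ Brd L i (pvChase L p (i + 1) fuel k) ∧
        (∀ m, m ≤ i → Brd L i m → L.getD m "" = L.getD (i + 1) "" → m ≤ pvChase L p (i + 1) fuel k) ∧
        (pvChase L p (i + 1) fuel k = 0 ∨ L.getD (pvChase L p (i + 1) fuel k) "" = L.getD (i + 1) "")) := by
  intro fuel
  induction fuel with
  | zero =>
    intro k hkf hki hbk hmax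
    have hk0 : k = 0 := by omega
    subst hk0
    exact ⟨hki, hbk, hmax, Or.inl rfl⟩
  | succ fuel ih =>
    intro k hkf hki hbk hmax
    by_cases hcond : 0 < k ∧ L.getD k "" ≠ L.getD (i + 1) ""
    · have hstep : pvChase L p (i + 1) (fuel + 1) k = pvChase L p (i + 1) fuel (p.getD (k - 1) 0) := by
        simp only [pvChase, if_pos hcond]
      rw [hstep]
      have hpk : p.getD (k - 1) 0 = lbn L (k - 1) := hp (k - 1) (by omega)
      rw [hpk]
      have hlble : lbn L (k - 1) ≤ k - 1 := lbn_le L (k - 1)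
      have hbrdk1 : Brd L (k - 1) (lbn L (k - 1)) := lbn_brd L (k - 1) (by omega)
      have hbrd : Brd L i (lbn L (k - 1)) :=
        brd_trans L i (lbn L (k - 1)) k hcond.1 hki hlble hbrdk1 hbk
      refine ih (lbn L (k - 1)) (by omega) (by omega) hbrd ?_
      intro m hmle hbm hmatch
      have hmk : m ≤ k := hmax m hmle hbm hmatch
      have hmne : m ≠ k := by
        intro h; rw [h] at hmatch; exact hcond.2 hmatch
      have hmlt : m < k := by omega
      have : Brd L (k - 1) m := brd_nest L i m k hmlt hki hbm hbk
      exact lbn_max L (k - 1) m (by omega) (by omega) this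
    · have hstep : pvChase L p (i + 1) (fuel + 1) k = k := by
        simp only [pvChase, if_neg hcond]
      rw [hstep]
      refine ⟨hki, hbk, hmax, ?_⟩
      by_cases hk0 : k = 0
      · exact Or.inl hk0
      · right
        by_contra hne
        exact hcond ⟨by omega, hne⟩

-- one iteration of A's outer loop computes exactly the naive longest border
theorem stepA_eq (L : List String) (p : List Nat) (i : Nat) (hi : i + 1 < L.length)
    (hp : ∀ j, j ≤ i → p.getD j 0 = lbn L j) :
    pvStepA L p (i + 1) = lbn L (i + 1) := by
  unfold pvStepA
  have hidx : i + 1 - 1 = i := by omega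
  rw [hidx, hp i (le_refl i)]
  set k0 := lbn L i with hk0
  have hinit : (∀ m, m ≤ i → Brd L i m → L.getD m "" = L.getD (i + 1) "" → m ≤ k0) := by
    intro m hmle hbm _
    exact lbn_max L i m (by omega) hmle hbm
  have hres := chase_correct L p i hi hp L.length k0
    (by have := lbn_le L i; omega) (lbn_le L i) (lbn_brd L i (by omega)) hinit
  set r := pvChase L p (i + 1) L.length k0 with hr
  obtain ⟨hrle, hrbrd, hrmax, hrexit⟩ := hres
  by_cases hmatch : L.getD r "" = L.getD (i + 1) ""
  · rw [if_pos hmatch]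
    have hub : r + 1 ≤ lbn L (i + 1) := by
      apply lbn_max L (i + 1) (r + 1) hi (by omega)
      rw [brd_succ_iff L (i + 1) r (by omega)]
      have e : i + 1 - 1 = i := by omega
      rw [e]
      exact ⟨hrbrd, hmatch⟩
    have hlb : lbn L (i + 1) ≤ r + 1 := by
      set c := lbn L (i + 1) with hc
      rcases Nat.eq_zero_or_pos c with h0 | h1
      · omega
      · have hcle : c ≤ i + 1 := lbn_le L (i + 1)
        have hcbrd : Brd L (i + 1) c := lbn_brd L (i + 1) hi
        have : Brd L (i + 1) (c - 1 + 1) := by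
          have e : c - 1 + 1 = c := by omega
          rw [e]; exact hcbrd
        rw [brd_succ_iff L (i + 1) (c - 1) (by omega)] at this
        have e : i + 1 - 1 = i := by omega
        rw [e] at this
        have := hrmax (c - 1) (by omega) this.1 this.2
        omega
    omega
  · rw [if_neg hmatch]
    have hr0 : r = 0 := by
      rcases hrexit with h | h
      · exact h
      · exact absurd h hmatch
    rw [hr0]
    by_contra hne
    have h1 : 1 ≤ lbn L (i + 1) := by omega
    set c := lbn L (i + 1) with hc
    have hcle : c ≤ i + 1 := lbn_le L (i + 1)
    have hcbrd : Brd L (i + 1) c := lbn_brd L (i + 1) hi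
    have : Brd L (i + 1) (c - 1 + 1) := by
      have e : c - 1 + 1 = c := by omega
      rw [e]; exact hcbrd
    rw [brd_succ_iff L (i + 1) (c - 1) (by omega)] at this
    have e : i + 1 - 1 = i := by omega
    rw [e] at this
    have hle0 := hrmax (c - 1) (by omega) this.1 this.2
    rw [hr0] at hle0
    have hc1 : c - 1 = 0 := by omega
    rw [hc1] at this
    rw [hr0] at hmatch
    exact hmatch this.2

-- A's whole loop builds [lbn 0, …, lbn m]
theorem pA_eq (L : List String) : ∀ m, m < L.length →
    (List.range' 1 m).foldl (fun p i => p ++ [pvStepA L p i]) [0]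
      = (List.range (m + 1)).map (lbn L) := by
  intro m
  induction m with
  | zero =>
    intro _
    have h0 : lbn L 0 = 0 := rfl
    simp [List.range_succ, h0]
  | succ m ih =>
    intro hlt
    have hprev := ih (by omega)
    rw [List.range'_concat, List.foldl_append, hprev]
    simp only [List.foldl_cons, List.foldl_nil]
    have hp : ∀ j, j ≤ m → ((List.range (m + 1)).map (lbn L)).getD j 0 = lbn L j := by
      intro j hj
      rw [List.getD_eq_getElem _ _ (by simp; omega)]
      simp
    have hstep := stepA_eq L ((List.range (m + 1)).map (lbn L)) m hlt hp
    have e : 1 + 1 * m = m + 1 := by omega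
    rw [e, hstep, List.range_succ (n := m + 1), List.map_append]
    rfl

-- ===== VERDICT (by name: the statement is the Claim_ definition above) =====
theorem solution_spec : Claim_equal_solution := by
  intro L _ hpre
  unfold Spec_solution solution solution_alt
  show PySem.Str.join " " (((List.range' 1 (L.length-1)).foldl (fun p i => p ++ [pvStepA L p i]) [0]).map (fun k => PySem.Int.toStr (Int.ofNat k))) = PySem.Str.join " " (((0 : Int) :: (List.range' 1 (L.length-1)).map (fun i => pvLB L i)).map (fun k => PySem.Int.toStr k))
  have hn : 1 ≤ L.length := by
    cases L with
    | nil => exact absurd rfl hpre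
    | cons a t => simp
  have hm : L.length - 1 < L.length := by omega
  rw [pA_eq L (L.length - 1) hm]
  have e : L.length - 1 + 1 = L.length := by omega
  rw [e]
  congr 1
  rcases Nat.exists_eq_add_of_le hn with ⟨t, ht⟩
  have ht' : L.length = t + 1 := by omega
  rw [ht']
  have e2 : t + 1 - 1 = t := by omega
  rw [e2, List.range_succ_eq_map, List.range'_eq_map_range]
  simp only [List.map_cons, List.map_map]
  congr 1
  apply List.map_congr_left
  intro j hj
  simp only [Function.comp]
  rw [pvLB_eq_lbn]
  have e3 : 1 + j = j + 1 := by omega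
  rw [e3]
  rfl
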